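-- pv_equiv track=rewrite | github.com/vijaygirish2001/CTC_problems | Others/q14.py | nearby_wrds
-- ===== SOURCE A (Python) =====
-- near_by_char= {'i':['e','a'], 's':['t','m']}
--
-- valid_wrds = ['is','es','it','at']
--
-- def nearby_wrds(s, new_wrd, index, all_wrds):
--     if index == len(s) :
--         if new_wrd in valid_wrds:
--             all_wrds.append(new_wrd)
--
--         return all_wrds
--
--     all_wrds = nearby_wrds(s, new_wrd + s[index], index+1, all_wrds)
--     if near_by_char.get(s[index]):
--         for i in near_by_char[s[index]]:
--             all_wrds= nearby_wrds(s, new_wrd + i, index+1, all_wrds)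
--
--     return all_wrds
-- ===== SOURCE B (Python) =====
-- # B: one forward pass keeping the worklist of prefixes (layered product), then filter;
-- # same return value and same in-place extension of all_wrds as A (alternative, not faster).
-- near_by_char = {'i': ['e', 'a'], 's': ['t', 'm']}
--
-- valid_wrds = ['is', 'es', 'it', 'at']
--
-- def nearby_wrds(s, new_wrd, index, all_wrds):
--     words = [new_wrd]
--     for j in range(index, len(s)):
--         c = s[j]
--         opts = [c] + near_by_char.get(c, [])
--         words = [w + o for w in words for o in opts]
--     all_wrds.extend(w for w in words if w in valid_wrds)
--     return all_wrds
-- ===== Notes on version B (the rewrite author's own statement) =====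
-- stated objective: alternative
-- what changed: Replaces A's depth-first recursion with accumulator threading by a single forward loop that maintains the worklist of all prefixes (layered cartesian product of per-position options) and filters the final layer against valid_wrds.
import Mathlib
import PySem

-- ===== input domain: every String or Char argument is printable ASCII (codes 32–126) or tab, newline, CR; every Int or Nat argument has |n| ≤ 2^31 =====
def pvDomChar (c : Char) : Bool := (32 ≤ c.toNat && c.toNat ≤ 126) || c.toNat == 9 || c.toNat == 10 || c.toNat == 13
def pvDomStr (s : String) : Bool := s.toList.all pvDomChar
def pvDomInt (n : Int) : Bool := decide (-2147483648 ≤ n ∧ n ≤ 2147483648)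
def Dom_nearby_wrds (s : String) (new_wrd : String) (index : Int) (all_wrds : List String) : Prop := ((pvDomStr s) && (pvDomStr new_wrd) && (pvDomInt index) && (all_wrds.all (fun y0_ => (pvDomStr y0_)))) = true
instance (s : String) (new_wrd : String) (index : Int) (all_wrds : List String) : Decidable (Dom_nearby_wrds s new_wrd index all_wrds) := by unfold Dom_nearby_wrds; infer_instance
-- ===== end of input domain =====

-- B replaces A's depth-first recursion by one forward loop over a worklist of prefixes (layered product)
-- then a final filter; equal return value on Pre_ (A and B also mutate all_wrds identically in Python).


def near_by_char : PySem.Dict Char (List Char) :=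
  PySem.Dict.ofList [('i', ['e', 'a']), ('s', ['t', 'm'])]

def valid_wrds : List String := ["is", "es", "it", "at"]

-- ===== PORT A =====
mutual
-- literal transliteration of A's recursion; on `pyGet? = none` Python raises IndexError (outside Pre_)
def nearby_wrds (s : String) (new_wrd : String) (index : Int) (all_wrds : List String) : List String :=
  if index == PySem.Str.len s then
    if valid_wrds.contains new_wrd then all_wrds ++ [new_wrd] else all_wrds
  else
    match h : PySem.Str.pyGet? s index with
    | none => all_wrds
    | some c =>
      let acc1 := nearby_wrds s (new_wrd.push c) (index + 1) all_wrds
      match PySem.Dict.get? near_by_char c with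
      | none => acc1
      | some lst => if lst.isEmpty then acc1 else nearbyLoop s new_wrd (index + 1) lst acc1
termination_by (2 * (PySem.Str.len s - index).toNat, 0)
decreasing_by
  all_goals
    (have hlt : index < (s.length : Int) := by
      by_contra hge
      have hn : PySem.List.pyGet? s.toList index = none :=
        (PySem.List.pyGet?_eq_none_iff s.toList index).mpr
          (by simp [PySem.Raise.InRange]; omega)
      simp only [PySem.Str.pyGet?_eq, PySem.Chars.pyGet?_eq_listPyGet?] at h
      simp [hn] at h)
  all_goals
    (have hlen : PySem.Str.len s = (s.length : Int) := by simp [PySem.Str.len_eq])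
  all_goals simp only [Prod.lex_def]
  all_goals omega

-- the `for i in near_by_char[s[index]]` loop of A as structural recursion
def nearbyLoop (s : String) (new_wrd : String) (idx : Int) (lst : List Char) (acc : List String) : List String :=
  match lst with
  | [] => acc
  | i :: rest => nearbyLoop s new_wrd idx rest (nearby_wrds s (new_wrd.push i) idx acc)
termination_by (2 * (PySem.Str.len s - idx).toNat + 1, lst.length)
decreasing_by
  all_goals first
    | (apply Prod.Lex.left; omega)
    | (apply Prod.Lex.right; simp)
end

-- ===== PORT B =====
-- transliteration of Source B: worklist `words` over range(index, len(s)); `none` branch unreachable inside Pre_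
def nearby_wrds_alt (s : String) (new_wrd : String) (index : Int) (all_wrds : List String) : List String :=
  let words := (PySem.List.pyRange index (PySem.Str.len s) 1).foldl
    (fun ws j =>
      match PySem.Str.pyGet? s j with
      | none => ws
      | some c => ws.flatMap (fun w => (c :: (PySem.Dict.get? near_by_char c).getD []).map (fun o => w.push o)))
    [new_wrd]
  all_wrds ++ words.filter (fun w => valid_wrds.contains w)

-- ===== PRECONDITION & SPEC =====
-- Pre_ excludes exactly the inputs on which A raises IndexError at s[index] (index beyond ±len(s)).
def Pre_nearby_wrds (s : String) (new_wrd : String) (index : Int) (all_wrds : List String) : Prop :=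
  -(PySem.Str.len s) ≤ index ∧ index ≤ PySem.Str.len s
instance (s : String) (new_wrd : String) (index : Int) (all_wrds : List String) : Decidable (Pre_nearby_wrds s new_wrd index all_wrds) := by unfold Pre_nearby_wrds; infer_instance
def pvWitness_nearby_wrds : String × String × Int × List String := ("is", "", 0, [])

def Spec_nearby_wrds (s : String) (new_wrd : String) (index : Int) (all_wrds : List String) (out : List String) : Prop := out = nearby_wrds_alt s new_wrd index all_wrds
instance (s : String) (new_wrd : String) (index : Int) (all_wrds : List String) (out : List String) : Decidable (Spec_nearby_wrds s new_wrd index all_wrds out) := by unfold Spec_nearby_wrds; infer_instance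

-- ===== CLAIM (what is proved, stated in full; the proofs are below) =====
def Claim_equal_nearby_wrds : Prop := ∀ (s : String) (new_wrd : String) (index : Int) (all_wrds : List String), Dom_nearby_wrds s new_wrd index all_wrds → Pre_nearby_wrds s new_wrd index all_wrds → Spec_nearby_wrds s new_wrd index all_wrds (nearby_wrds s new_wrd index all_wrds)

-- ===== LEMMAS AND PROOFS =====

def pvOpts (c : Char) : List Char := c :: (PySem.Dict.get? near_by_char c).getD []

def pvExpand (cs : List Char) (w : String) : List String :=
  match cs with
  | [] => [w]
  | c :: rest => (pvOpts c).flatMap (fun o => pvExpand rest (w.push o))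

def pvChars (s : String) (index : Int) : List Char :=
  (PySem.List.pyRange index (PySem.Str.len s) 1).map (fun j => ((PySem.Str.pyGet? s j).getD ' '))

def pvFilt (xs : List String) : List String := xs.filter (fun w => valid_wrds.contains w)

theorem pvGet_some (s : String) (j : Int) (h1 : -(PySem.Str.len s) ≤ j) (h2 : j < PySem.Str.len s) :
    PySem.Str.pyGet? s j = some ((PySem.Str.pyGet? s j).getD ' ') := by
  have hL : PySem.Str.len s = (s.length : Int) := by simp [PySem.Str.len_eq]
  simp only [PySem.Str.pyGet?_eq, PySem.Chars.pyGet?_eq_listPyGet?]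
  cases hx : PySem.List.pyGet? s.toList j with
  | none =>
    exfalso
    rw [PySem.List.pyGet?_eq_none_iff] at hx
    refine hx ?_
    simp [PySem.Raise.InRange]
    omega
  | some c => simp

theorem pvA_main (s : String) : ∀ (n : Nat) (index : Int) (new_wrd : String) (acc : List String),
    -(PySem.Str.len s) ≤ index → index ≤ PySem.Str.len s → (PySem.Str.len s - index).toNat = n →
    nearby_wrds s new_wrd index acc = acc ++ pvFilt (pvExpand (pvChars s index) new_wrd) := by
  intro n
  induction n with
  | zero =>
    intro index new_wrd acc h1 h2 hn
    have hL : PySem.Str.len s = (s.length : Int) := by simp [PySem.Str.len_eq]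
    have hidx : index = PySem.Str.len s := by omega
    have hr : PySem.List.pyRange index (PySem.Str.len s) 1 = [] :=
      PySem.List.pyRange_one_eq_nil (by omega)
    unfold nearby_wrds
    rw [if_pos (by simp [hidx])]
    simp only [pvChars, hr, List.map_nil, pvExpand, pvFilt, List.filter]
    split <;> simp_all
  | succ n ih =>
    intro index new_wrd acc h1 h2 hn
    have hL : PySem.Str.len s = (s.length : Int) := by simp [PySem.Str.len_eq]
    have hlt : index < PySem.Str.len s := by omega
    have hget := pvGet_some s index h1 hlt
    have hchars : pvChars s index
        = ((PySem.Str.pyGet? s index).getD ' ') :: pvChars s (index + 1) := by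
      rw [pvChars, PySem.List.pyRange_one_cons (by omega), List.map_cons]
      rfl
    have ihcall : ∀ (w : String) (acc' : List String), nearby_wrds s w (index + 1) acc'
        = acc' ++ pvFilt (pvExpand (pvChars s (index + 1)) w) :=
      fun w acc' => ih (index + 1) w acc' (by omega) (by omega) (by omega)
    have hloop : ∀ (lst : List Char) (acc' : List String), nearbyLoop s new_wrd (index + 1) lst acc'
        = acc' ++ pvFilt (lst.flatMap (fun i => pvExpand (pvChars s (index + 1)) (new_wrd.push i))) := by
      intro lst
      induction lst with
      | nil => intro acc'; simp [nearbyLoop, pvFilt]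
      | cons i rest ihl =>
        intro acc'
        rw [nearbyLoop, ihl, ihcall]
        simp [pvFilt, List.filter_append]
    obtain ⟨c, hc⟩ : ∃ c, PySem.Str.pyGet? s index = some c := ⟨_, hget⟩
    have hchars' : pvChars s index = c :: pvChars s (index + 1) := by
      rw [hchars, hc]
      rfl
    unfold nearby_wrds
    rw [if_neg (by simp; omega)]
    rw [hchars']
    split
    · next heq =>
      rw [hc] at heq
      exact absurd heq (Option.some_ne_none _)
    · next x heq =>
      rw [hc] at heq
      obtain rfl : c = x := Option.some.inj heq
      cases hd : PySem.Dict.get? near_by_char c with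
      | none =>
        simp only [ihcall]
        simp [pvExpand, pvOpts, hd, pvFilt]
      | some lst =>
        by_cases hemp : lst.isEmpty
        · have : lst = [] := List.isEmpty_iff.mp hemp
          subst this
          simp only [hemp, ihcall]
          simp [pvExpand, pvOpts, hd, pvFilt]
        · simp only [hemp, hloop, ihcall]
          simp [pvExpand, pvOpts, hd, pvFilt, List.filter_append, List.append_assoc]

theorem pvB_fold (s : String) : ∀ (js : List Int) (ws : List String),
    (∀ j ∈ js, -(PySem.Str.len s) ≤ j ∧ j < PySem.Str.len s) →
    js.foldl
      (fun ws j =>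
        match PySem.Str.pyGet? s j with
        | none => ws
        | some c => ws.flatMap (fun w => (c :: (PySem.Dict.get? near_by_char c).getD []).map (fun o => w.push o)))
      ws
    = ws.flatMap (fun w => pvExpand (js.map (fun j => (PySem.Str.pyGet? s j).getD ' ')) w) := by
  intro js
  induction js with
  | nil => intro ws _; simp [pvExpand]
  | cons j rest ih =>
    intro ws hjs
    have hj := hjs j (List.mem_cons_self)
    have hget := pvGet_some s j hj.1 hj.2
    obtain ⟨c, hc⟩ : ∃ c, PySem.Str.pyGet? s j = some c := ⟨_, hget⟩
    rw [List.foldl_cons, ih _ (fun j' hj' => hjs j' (List.mem_cons_of_mem _ hj'))]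
    rw [List.map_cons]
    simp only [hc]
    simp [pvExpand, pvOpts, List.flatMap_assoc, List.flatMap_map]

-- ===== VERDICT (by name: the statement is the Claim_ definition above) =====
theorem nearby_wrds_spec : Claim_equal_nearby_wrds := by
  intro s new_wrd index all_wrds _hDom hPre
  obtain ⟨h1, h2⟩ := hPre
  unfold Spec_nearby_wrds nearby_wrds_alt
  rw [pvB_fold s _ [new_wrd] (fun j hj => by
    rw [PySem.List.mem_pyRange_one] at hj; exact ⟨by omega, hj.2⟩)]
  rw [pvA_main s (PySem.Str.len s - index).toNat index new_wrd all_wrds h1 h2 rfl]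
  simp [pvChars, pvFilt]
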